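-- pv_equiv track=rewrite | github.com/bitofbing/DS | new_sum.py | decompose_order_code
-- ===== SOURCE A (Python) =====
-- from typing import List, Dict, Tuple, Set, Any
--
-- def decompose_order_code(v: Tuple[str, ...]) -> List[Tuple[str, ...]]:
--     non_zero_elements = []
--     for i, symbol in enumerate(v):
--         if symbol != '0':
--             non_zero_elements.append((i, symbol))
--
--     if not non_zero_elements:
--         return [v]
--
--     decomposed_codes = []
--     for keep_mask in range(1, 1 << len(non_zero_elements)):
--         new_code = list(v)
--         valid = True
--         kept_symbols = set()
--         for j, (pos, symbol) in enumerate(non_zero_elements):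
--             if keep_mask & (1 << j):
--                 if symbol in kept_symbols:
--                     valid = False
--                     break
--                 kept_symbols.add(symbol)
--             else:
--                 new_code[pos] = '0'
--         if valid:
--             decomposed_codes.append(tuple(new_code))
--     return decomposed_codes
-- ===== SOURCE B (Python) =====
-- def decompose_order_code(v):
--     # Incrementally build only the valid keep-masks (at most one kept position per symbol),
--     # in increasing mask order, instead of testing all 2^k masks.
--     non_zero_elements = [(i, s) for i, s in enumerate(v) if s != '0']
--     if not non_zero_elements:
--         return [v]
--     states = [(0, frozenset())]  # (mask, symbols kept), sorted by mask
--     for j, (_, symbol) in enumerate(non_zero_elements):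
--         states = states + [(m | (1 << j), kept | {symbol})
--                            for (m, kept) in states if symbol not in kept]
--     result = []
--     for m, _ in states[1:]:  # states[0] is the empty mask
--         code = list(v)
--         for j, (pos, _) in enumerate(non_zero_elements):
--             if not (m >> j) & 1:
--                 code[pos] = '0'
--         result.append(tuple(code))
--     return result
-- ===== Notes on version B (the rewrite author's own statement) =====
-- stated objective: alternative
-- what changed: A enumerates all 2^k keep-masks and re-tests each one for symbol repeats; B incrementally grows the set of valid (mask, kept-symbols) states one non-zero position at a time, so valid masks come out already in increasing order with no per-mask validity scan; B avoids touching invalid masks but the output itself can be exponential, so the overall cost is comparable.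
import Mathlib
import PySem

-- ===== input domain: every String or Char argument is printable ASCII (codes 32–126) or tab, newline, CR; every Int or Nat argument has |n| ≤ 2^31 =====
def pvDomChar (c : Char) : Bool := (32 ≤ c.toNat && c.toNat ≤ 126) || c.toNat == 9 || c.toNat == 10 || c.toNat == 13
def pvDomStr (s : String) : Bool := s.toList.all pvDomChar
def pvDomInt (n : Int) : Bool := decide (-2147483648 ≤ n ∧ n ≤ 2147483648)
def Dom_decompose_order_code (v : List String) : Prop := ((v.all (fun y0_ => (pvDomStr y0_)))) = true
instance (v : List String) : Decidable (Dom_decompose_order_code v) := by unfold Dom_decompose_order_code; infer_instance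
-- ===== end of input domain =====

-- B replaces A's test of all 2^k keep-masks by an incremental construction of only the
-- valid masks, produced directly in increasing order (same return value).

-- ===== PORT A =====
-- the enumerate-and-append loop building non_zero_elements (the index carried as a Nat counter)
def pvA_nonZero : List String → Nat → List (Nat × String)
  | [], _ => []
  | s :: rest, i =>
    if s ≠ "0" then (i, s) :: pvA_nonZero rest (i + 1) else pvA_nonZero rest (i + 1)

-- the inner 'for j, (pos, symbol) in enumerate(non_zero_elements)' loop with its break:
-- some new_code when valid, none on the break
def pvA_inner : List (Nat × String) → Nat → Nat → List String → PySem.Set String → Option (List String)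
  | [], _, _, newCode, _ => some newCode
  | (pos, symbol) :: rest, keepMask, j, newCode, kept =>
    if keepMask &&& (1 <<< j) ≠ 0 then
      if kept.contains symbol then none
      else pvA_inner rest keepMask (j + 1) newCode (PySem.Set.add kept symbol)
    else pvA_inner rest keepMask (j + 1) (newCode.set pos "0") kept

def decompose_order_code (v : List String) : List (List String) :=
  let nonZero := pvA_nonZero v 0
  if nonZero = [] then [v]
  else
    -- for keep_mask in range(1, 1 << len(non_zero_elements)): … append when valid
    (List.range' 1 (2 ^ nonZero.length - 1)).foldl
      (fun acc keepMask =>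
        match pvA_inner nonZero keepMask 0 v [] with
        | some newCode => acc ++ [newCode]
        | none => acc) []

-- ===== PORT B =====
-- the [(i, s) for i, s in enumerate(v) if s != '0'] comprehension
def pvB_nonZero (v : List String) : List (Nat × String) :=
  v.zipIdx.filterMap (fun si => if si.1 ≠ "0" then some (si.2, si.1) else none)

-- one step of B's states loop: keep every state, and extend each state whose kept set
-- misses the symbol by setting bit j
def pvB_extend (states : List (Nat × PySem.Set String)) (j : Nat) (symbol : String) :
    List (Nat × PySem.Set String) :=
  states ++ states.filterMap (fun st =>
    if st.2.contains symbol then none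
    else some (st.1 ||| (1 <<< j), PySem.Set.add st.2 symbol))

def pvB_states : List (Nat × String) → Nat → List (Nat × PySem.Set String) →
    List (Nat × PySem.Set String)
  | [], _, states => states
  | (_, symbol) :: rest, j, states => pvB_states rest (j + 1) (pvB_extend states j symbol)

-- the code-building loop: clear every non-zero position whose bit is not kept
def pvB_code : List (Nat × String) → Nat → Nat → List String → List String
  | [], _, _, code => code
  | (pos, _) :: rest, m, j, code =>
    pvB_code rest m (j + 1) (if (m >>> j) &&& 1 == 0 then code.set pos "0" else code)

def decompose_order_code_alt (v : List String) : List (List String) :=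
  let nonZero := pvB_nonZero v
  if nonZero.isEmpty then [v]
  else
    ((pvB_states nonZero 0 [(0, [])]).drop 1).foldl
      (fun res st => res ++ [pvB_code nonZero st.1 0 v]) []

-- ===== PRECONDITION & SPEC =====
def Spec_decompose_order_code (v : List String) (out : List (List String)) : Prop := out = decompose_order_code_alt v
instance (v : List String) (out : List (List String)) : Decidable (Spec_decompose_order_code v out) := by unfold Spec_decompose_order_code; infer_instance

-- ===== CLAIM (what is proved, stated in full; the proofs are below) =====
def Claim_equal_decompose_order_code : Prop := ∀ (v : List String), Dom_decompose_order_code v → Spec_decompose_order_code v (decompose_order_code v)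

-- ===== LEMMAS AND PROOFS =====

-- the two non_zero_elements lists coincide
theorem pv_nonZero_eq (v : List String) (i : Nat) :
    pvA_nonZero v i = (v.zipIdx i).filterMap
      (fun si => if si.1 ≠ "0" then some (si.2, si.1) else none) := by
  induction v generalizing i with
  | nil => rfl
  | cons s rest ih =>
    simp only [pvA_nonZero, List.zipIdx_cons, List.filterMap_cons]
    by_cases h : s = "0" <;> simp [h, ih]

-- 'keep_mask & (1 << j)' tests bit j
theorem pv_bit_ne_iff (m j : Nat) : (m &&& (1 <<< j) ≠ 0) ↔ m.testBit j = true := by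
  rw [Nat.shiftLeft_eq, one_mul, Nat.and_two_pow]
  cases hb : m.testBit j <;> simp

-- validity test and kept-symbol set of a mask, as A's inner loop computes them
def pvChk : List (Nat × String) → Nat → Nat → PySem.Set String → Bool
  | [], _, _, _ => true
  | (_, s) :: rest, m, j, kept =>
    if m &&& (1 <<< j) ≠ 0 then
      !kept.contains s && pvChk rest m (j + 1) (PySem.Set.add kept s)
    else pvChk rest m (j + 1) kept

def pvKept : List (Nat × String) → Nat → Nat → PySem.Set String → PySem.Set String
  | [], _, _, kept => kept
  | (_, s) :: rest, m, j, kept =>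
    if m &&& (1 <<< j) ≠ 0 then pvKept rest m (j + 1) (PySem.Set.add kept s)
    else pvKept rest m (j + 1) kept

-- A's inner loop = validity test + B's code-building loop
theorem pv_inner_eq (nz : List (Nat × String)) (m j : Nat) (code : List String)
    (kept : PySem.Set String) :
    pvA_inner nz m j code kept =
      if pvChk nz m j kept then some (pvB_code nz m j code) else none := by
  induction nz generalizing j code kept with
  | nil => rfl
  | cons e rest ih =>
    obtain ⟨pos, s⟩ := e
    simp only [pvA_inner, pvChk, pvB_code]
    by_cases h : m &&& (1 <<< j) ≠ 0
    · have hb : m.testBit j = true := (pv_bit_ne_iff m j).mp h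
      have hmod : m >>> j % 2 = 1 := by
        simpa [Nat.shiftRight_eq_div_pow, Nat.testBit_eq_decide_div_mod_eq] using hb
      by_cases hc : kept.contains s = true
      · have hm : s ∈ kept := by simpa using hc
        simp [h, hm]
      · have hm : s ∉ kept := by simpa using hc
        simp [h, hm, ih, hmod]
    · have hb : m.testBit j = false := by
        cases hx : m.testBit j
        · rfl
        · exact absurd ((pv_bit_ne_iff m j).mpr hx) h
      have hmod : m >>> j % 2 = 0 := by
        simpa [Nat.shiftRight_eq_div_pow, Nat.testBit_eq_decide_div_mod_eq] using hb
      simp [h, ih, hmod]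

-- mask 0 keeps nothing and is always valid
theorem pv_chk_zero (nz : List (Nat × String)) (j : Nat) (kept : PySem.Set String) :
    pvChk nz 0 j kept = true ∧ pvKept nz 0 j kept = kept := by
  induction nz generalizing j kept with
  | nil => exact ⟨rfl, rfl⟩
  | cons e rest ih =>
    obtain ⟨p, s⟩ := e
    simpa [pvChk, pvKept, Nat.zero_and] using ih (j := j + 1) (kept := kept)

-- pvChk/pvKept only read the bits j, …, j + len − 1 of the mask
theorem pv_congr (nz : List (Nat × String)) (m m' j : Nat) (kept : PySem.Set String)
    (h : ∀ t, t < nz.length → m.testBit (j + t) = m'.testBit (j + t)) :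
    pvChk nz m j kept = pvChk nz m' j kept ∧ pvKept nz m j kept = pvKept nz m' j kept := by
  induction nz generalizing j kept with
  | nil => exact ⟨rfl, rfl⟩
  | cons e rest ih =>
    obtain ⟨p, s⟩ := e
    have h0 : m.testBit j = m'.testBit j := by simpa using h 0 (by simp)
    have hrest : ∀ t, t < rest.length → m.testBit (j + 1 + t) = m'.testBit (j + 1 + t) := by
      intro t ht
      have := h (t + 1) (by simpa using Nat.succ_lt_succ ht)
      simpa [Nat.add_assoc, Nat.add_comm 1 t] using this
    simp only [pvChk, pvKept]
    by_cases h1 : m &&& (1 <<< j) ≠ 0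
    · have h2 : m' &&& (1 <<< j) ≠ 0 := by
        rw [pv_bit_ne_iff, ← h0, ← pv_bit_ne_iff]; exact h1
      have := ih (j := j + 1) (kept := PySem.Set.add kept s) hrest
      simp [h1, h2, this.1, this.2]
    · have h2 : ¬ m' &&& (1 <<< j) ≠ 0 := by
        rw [pv_bit_ne_iff, ← h0, ← pv_bit_ne_iff]; exact h1
      simpa [h1, h2] using ih (j := j + 1) (kept := kept) hrest

-- appending one element at the end of non_zero_elements
theorem pv_chk_append (nz : List (Nat × String)) (p : Nat) (s : String) (m j : Nat)
    (kept : PySem.Set String) :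
    pvChk (nz ++ [(p, s)]) m j kept =
      (if m.testBit (j + nz.length) then
        pvChk nz m j kept && !(pvKept nz m j kept).contains s
      else pvChk nz m j kept) ∧
    pvKept (nz ++ [(p, s)]) m j kept =
      (if m.testBit (j + nz.length) then PySem.Set.add (pvKept nz m j kept) s
      else pvKept nz m j kept) := by
  induction nz generalizing j kept with
  | nil =>
    simp only [List.nil_append, pvChk, pvKept, List.length_nil, Nat.add_zero]
    by_cases h1 : m &&& (1 <<< j) ≠ 0
    · have hb : m.testBit j = true := (pv_bit_ne_iff m j).mp h1
      simp [h1, hb, Bool.and_comm]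
    · have hb : m.testBit j = false := by
        cases hx : m.testBit j
        · rfl
        · exact absurd ((pv_bit_ne_iff m j).mpr hx) h1
      simp [h1, hb]
  | cons e rest ih =>
    obtain ⟨q, t⟩ := e
    have harith : j + (rest.length + 1) = (j + 1) + rest.length := by omega
    simp only [List.cons_append, pvChk, pvKept, List.length_cons, harith]
    by_cases h : m &&& (1 <<< j) ≠ 0 <;>
      cases hT : m.testBit (j + 1 + rest.length) <;>
        simp [h, ih, hT, Bool.and_assoc]

-- the states loop distributes over list append
theorem pv_states_append (l1 l2 : List (Nat × String)) (j : Nat)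
    (S : List (Nat × PySem.Set String)) :
    pvB_states (l1 ++ l2) j S = pvB_states l2 (j + l1.length) (pvB_states l1 j S) := by
  induction l1 generalizing j S with
  | nil => simp [pvB_states]
  | cons e rest ih =>
    obtain ⟨p, s⟩ := e
    have harith : j + (rest.length + 1) = (j + 1) + rest.length := by omega
    simp [pvB_states, ih, harith]

-- OR-ing in a fresh high bit is addition
theorem pv_or_eq_add (k m : Nat) (h : m < 2 ^ k) : m ||| (1 <<< k) = 2 ^ k + m := by
  rw [Nat.shiftLeft_eq, one_mul]
  apply Nat.eq_of_testBit_eq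
  intro i
  rcases Nat.lt_trichotomy i k with hi | hi | hi
  · rw [Nat.testBit_lor, Nat.testBit_two_pow_of_ne (by omega),
      Nat.testBit_two_pow_add_gt hi, Bool.or_false]
  · subst hi
    rw [Nat.testBit_lor, Nat.testBit_two_pow_self, Nat.testBit_two_pow_add_eq,
      Nat.testBit_eq_false_of_lt h]
    simp
  · have hpow : 2 ^ (k + 1) ≤ 2 ^ i := Nat.pow_le_pow_right (by omega) (by omega)
    have hkk : 2 ^ (k + 1) = 2 ^ k + 2 ^ k := Nat.two_pow_succ k
    have h1 : m.testBit i = false := Nat.testBit_eq_false_of_lt (by omega)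
    have h2 : (2 ^ k + m).testBit i = false := Nat.testBit_eq_false_of_lt (by omega)
    rw [Nat.testBit_lor, Nat.testBit_two_pow_of_ne (by omega), h1, h2, Bool.or_false]

-- the main characterisation of B's states list: exactly the masks A's test accepts,
-- in increasing order, paired with their kept-symbol sets
theorem pv_states_main (nz : List (Nat × String)) :
    pvB_states nz 0 [(0, [])] =
      (List.range (2 ^ nz.length)).filterMap
        (fun m => if pvChk nz m 0 [] then some (m, pvKept nz m 0 []) else none) := by
  induction nz using List.reverseRecOn with
  | nil => simp [pvB_states, pvChk, pvKept]
  | append_singleton nz e ih =>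
    obtain ⟨p, s⟩ := e
    rw [pv_states_append nz [(p, s)] 0 [(0, [])], ih]
    show pvB_extend _ (0 + nz.length) s = _
    rw [Nat.zero_add]
    unfold pvB_extend
    have hlen : (nz ++ [(p, s)]).length = nz.length + 1 := by simp
    rw [hlen, Nat.two_pow_succ, List.range_add, List.filterMap_append,
      List.filterMap_filterMap, List.filterMap_map]
    congr 1
    · apply List.filterMap_congr
      intro m hm
      have hm' := List.mem_range.mp hm
      have hbit : m.testBit (0 + nz.length) = false := by
        simpa using Nat.testBit_eq_false_of_lt hm'
      rw [(pv_chk_append nz p s m 0 []).1, (pv_chk_append nz p s m 0 []).2, hbit]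
      simp
    · apply List.filterMap_congr
      intro m hm
      have hm' := List.mem_range.mp hm
      simp only [Function.comp]
      have hbitk : (2 ^ nz.length + m).testBit (0 + nz.length) = true := by
        rw [Nat.zero_add, Nat.testBit_two_pow_add_eq, Nat.testBit_eq_false_of_lt hm']
        rfl
      have hcong := pv_congr nz (2 ^ nz.length + m) m 0 []
        (fun t ht => by simpa using Nat.testBit_two_pow_add_gt (by simpa using ht) m)
      rw [(pv_chk_append nz p s _ 0 []).1, (pv_chk_append nz p s _ 0 []).2, hbitk]
      rw [if_pos rfl, if_pos rfl, hcong.1, hcong.2]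
      by_cases hc : pvChk nz m 0 [] = true
      · by_cases hs : (pvKept nz m 0 []).contains s = true
        · have hms : s ∈ pvKept nz m 0 [] := by simpa using hs
          simp [hc, hms]
        · have hms : s ∉ pvKept nz m 0 [] := by simpa using hs
          simp [hc, hms, pv_or_eq_add nz.length m hm']
      · simp [Bool.eq_false_iff.mpr hc]

-- A's conditional-append loop is a filterMap
theorem pv_A_loop (nz : List (Nat × String)) (v : List String) (l : List Nat)
    (acc : List (List String)) :
    l.foldl (fun acc keepMask =>
        match pvA_inner nz keepMask 0 v [] with
        | some newCode => acc ++ [newCode]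
        | none => acc) acc =
      acc ++ l.filterMap (fun m => pvA_inner nz m 0 v []) := by
  induction l generalizing acc with
  | nil => simp
  | cons x rest ih => cases hx : pvA_inner nz x 0 v [] <;> simp [hx, ih]

-- B's append loop is a map
theorem pv_B_loop (nz : List (Nat × String)) (v : List String)
    (l : List (Nat × PySem.Set String)) (acc : List (List String)) :
    l.foldl (fun res st => res ++ [pvB_code nz st.1 0 v]) acc =
      acc ++ l.map (fun st => pvB_code nz st.1 0 v) := by
  induction l generalizing acc with
  | nil => simp
  | cons x rest ih => simp [ih]

-- ===== VERDICT (by name: the statement is the Claim_ definition above) =====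
theorem decompose_order_code_spec : Claim_equal_decompose_order_code := by
  intro v _
  show decompose_order_code v = decompose_order_code_alt v
  have hnz : pvA_nonZero v 0 = pvB_nonZero v := pv_nonZero_eq v 0
  simp only [decompose_order_code, decompose_order_code_alt, hnz]
  set nz := pvB_nonZero v with hnzdef
  by_cases h : nz = []
  · simp [h]
  · have hne : nz.isEmpty = false := by simpa [List.isEmpty_iff] using h
    rw [if_neg h, hne]
    simp only [Bool.false_eq_true, if_false]
    rw [pv_A_loop, pv_B_loop, pv_states_main]
    simp only [List.nil_append]
    have hrange : List.range (2 ^ nz.length) = 0 :: List.range' 1 (2 ^ nz.length - 1) := by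
      have h1 : 2 ^ nz.length = (2 ^ nz.length - 1) + 1 := by
        have := Nat.two_pow_pos nz.length; omega
      rw [List.range_eq_range']
      conv_lhs => rw [h1]
      simp [List.range'_succ]
    rw [hrange]
    have hsplit : List.filterMap
        (fun m => if pvChk nz m 0 [] = true then some (m, pvKept nz m 0 []) else none)
        (0 :: List.range' 1 (2 ^ nz.length - 1)) =
        ((0 : Nat), ([] : PySem.Set String)) :: List.filterMap
          (fun m => if pvChk nz m 0 [] = true then some (m, pvKept nz m 0 []) else none)
          (List.range' 1 (2 ^ nz.length - 1)) := by
      rw [List.filterMap_cons]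
      simp [(pv_chk_zero nz 0 []).1, (pv_chk_zero nz 0 []).2]
    rw [hsplit, List.drop_succ_cons, List.drop_zero, List.map_filterMap]
    apply List.filterMap_congr
    intro m _
    rw [pv_inner_eq]
    by_cases hc : pvChk nz m 0 [] = true
    · simp [hc]
    · simp [Bool.eq_false_iff.mpr hc]
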